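-- pv_equiv track=rewrite | github.com/howhint/bio-project | 06_analyze_occurrences.py | build_region_masks
-- ===== SOURCE A (Python) =====
-- from collections import defaultdict
-- from typing import Any, Dict, List, Optional, Set, Tuple
--
-- def build_region_masks(animals: List[Dict[str, Any]]) -> Tuple[Dict[str, int], int]:
--     region_key_to_mask: Dict[str, int] = defaultdict(int)
--     fallback_all_regions_mask = 0
--     for idx, item in enumerate(animals):
--         bit = 1 << idx
--         occupied = item.get("occupied_region_keys", set())
--         if occupied:
--             for region_key in occupied:
--                 region_key_to_mask[region_key] |= bit
--         else:
--             # Fallback requested by user: if no occupied regions were found,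
--             # treat the animal as matching all regions.
--             fallback_all_regions_mask |= bit
--     return dict(region_key_to_mask), int(fallback_all_regions_mask)
-- ===== SOURCE B (Python) =====
-- from typing import Any, Dict, List, Tuple
--
--
-- def build_region_masks(animals: List[Dict[str, Any]]) -> Tuple[Dict[str, int], int]:
--     # Key-centric: collect the distinct region keys in first-appearance order,
--     # then compute each region's mask (and the fallback mask) by a scan over
--     # all animals' occupied sets.
--     occs = [item.get("occupied_region_keys", set()) for item in animals]
--
--     keys: List[str] = []
--     for occ in occs:
--         for k in occ:
--             if k not in keys:
--                 keys.append(k)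
--
--     def mask_where(pred) -> int:
--         m = 0
--         for idx, occ in enumerate(occs):
--             if pred(occ):
--                 m |= 1 << idx
--         return m
--
--     return ({k: mask_where(lambda occ, k=k: k in occ) for k in keys},
--             mask_where(lambda occ: not occ))
-- ===== Notes on version B (the rewrite author's own statement) =====
-- stated objective: alternative
-- what changed: Replaces A's single animal-driven pass that accumulates bits into a dict with a key-centric scheme: first collect the distinct region keys in first-appearance order, then compute each region's mask (and the fallback mask) by scanning all animals' occupied sets with a predicate.
import Mathlib
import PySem

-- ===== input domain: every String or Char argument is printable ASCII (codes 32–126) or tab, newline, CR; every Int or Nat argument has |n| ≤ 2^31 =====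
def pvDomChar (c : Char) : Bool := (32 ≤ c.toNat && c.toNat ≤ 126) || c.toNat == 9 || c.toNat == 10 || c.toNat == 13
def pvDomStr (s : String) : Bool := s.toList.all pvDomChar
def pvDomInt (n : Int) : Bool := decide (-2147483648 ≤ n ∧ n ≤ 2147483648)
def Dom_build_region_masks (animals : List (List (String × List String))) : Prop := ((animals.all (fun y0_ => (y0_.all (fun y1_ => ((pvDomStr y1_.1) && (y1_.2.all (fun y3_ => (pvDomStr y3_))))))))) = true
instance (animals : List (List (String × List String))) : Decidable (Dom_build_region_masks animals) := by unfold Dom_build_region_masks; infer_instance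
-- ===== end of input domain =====

-- B is a key-centric re-implementation: it first collects the distinct region keys in
-- first-appearance order, then computes each region's mask (and the fallback mask) by a
-- predicate scan over all animals' occupied sets ('alternative'; same observable result).

-- ===== PORT A =====
def build_region_masks (animals : List (List (String × List String))) : (List (String × Int)) × Int :=
  let st := (PySem.List.enumerate animals 0).foldl
    (fun (st : PySem.Dict String Int × Int) p =>
      let bit : Int := 2 ^ p.1.toNat                                   -- 1 << idx (idx ≥ 0)
      let occupied := (PySem.Dict.mk p.2).getD "occupied_region_keys" []
      if occupied ≠ [] then
        (occupied.foldl (fun d k => d.modify k 0 (fun v => PySem.Int.bor v bit)) st.1, st.2)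
      else
        (st.1, PySem.Int.bor st.2 bit))
    (PySem.Dict.empty, 0)
  (st.1.items, st.2)

-- ===== PORT B =====
-- 'if k not in keys: keys.append(k)' from Source B
def pvAddKey (ks : List String) (k : String) : List String :=
  if ks.contains k then ks else ks ++ [k]

-- the key-collection pass of Source B
def pvKeys (occs : List (List String)) : List String :=
  occs.foldl (fun ks occ => occ.foldl pvAddKey ks) []

-- mask_where from Source B: OR 1 << idx over the animals whose occupied set satisfies pred
def pvMaskWhere (occs : List (List String)) (pred : List String → Bool) : Int :=
  (PySem.List.enumerate occs 0).foldl
    (fun m p => if pred p.2 then PySem.Int.bor m (2 ^ p.1.toNat) else m) 0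

def build_region_masks_alt (animals : List (List (String × List String))) : (List (String × Int)) × Int :=
  let occs := animals.map (fun item => (PySem.Dict.mk item).getD "occupied_region_keys" [])
  ((pvKeys occs).map (fun k => (k, pvMaskWhere occs (fun occ => occ.contains k))),
   pvMaskWhere occs (fun occ => occ == []))

-- ===== PRECONDITION & SPEC =====
def Spec_build_region_masks (animals : List (List (String × List String))) (out : (List (String × Int)) × Int) : Prop := out = build_region_masks_alt animals
instance (animals : List (List (String × List String))) (out : (List (String × Int)) × Int) : Decidable (Spec_build_region_masks animals out) := by unfold Spec_build_region_masks; infer_instance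

-- ===== CLAIM (what is proved, stated in full; the proofs are below) =====
def Claim_equal_build_region_masks : Prop := ∀ (animals : List (List (String × List String))), Dom_build_region_masks animals → Spec_build_region_masks animals (build_region_masks animals)

-- ===== LEMMAS AND PROOFS =====

theorem pvEnumAppend {α : Type} (l : List α) (n : Int) (x : α) :
    PySem.List.enumerate (l ++ [x]) n = PySem.List.enumerate l n ++ [(n + l.length, x)] := by
  induction l generalizing n with
  | nil => simp [PySem.List.enumerate_cons, PySem.List.enumerate_nil]
  | cons a t ih => simp [PySem.List.enumerate_cons, ih]; ring

theorem pvBorNonneg (v b : Int) (hv : 0 ≤ v) (hb : 0 ≤ b) : 0 ≤ PySem.Int.bor v b := by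
  rw [PySem.Int.bor_of_nonneg hv hb]; positivity

theorem pvBorIdem (v b : Int) (hv : 0 ≤ v) (hb : 0 ≤ b) :
    PySem.Int.bor (PySem.Int.bor v b) b = PySem.Int.bor v b := by
  rw [PySem.Int.bor_of_nonneg hv hb, PySem.Int.bor_of_nonneg (by positivity) hb]
  simp

theorem pvMaskWhere_nonneg_aux (pred : List String → Bool)
    (l : List (Int × List String)) : ∀ m : Int, 0 ≤ m →
    0 ≤ l.foldl (fun m p => if pred p.2 then PySem.Int.bor m (2 ^ p.1.toNat) else m) m := by
  induction l with
  | nil => intro m hm; simpa using hm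
  | cons p t ih =>
      intro m hm
      simp only [List.foldl_cons]
      by_cases h : pred p.2 = true
      · rw [if_pos h]; exact ih _ (pvBorNonneg _ _ hm (by positivity))
      · rw [if_neg h]; exact ih _ hm

theorem pvMaskWhere_nonneg (occs : List (List String)) (pred : List String → Bool) :
    0 ≤ pvMaskWhere occs pred :=
  pvMaskWhere_nonneg_aux pred _ 0 le_rfl

theorem pvMaskWhere_append (occs : List (List String)) (o : List String)
    (pred : List String → Bool) :
    pvMaskWhere (occs ++ [o]) pred
      = if pred o then PySem.Int.bor (pvMaskWhere occs pred) (2 ^ occs.length)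
        else pvMaskWhere occs pred := by
  unfold pvMaskWhere
  rw [pvEnumAppend, List.foldl_append]
  simp

theorem pvContains_mk_map (ks : List String) (g : String → Int) (k0 : String) :
    (PySem.Dict.mk (ks.map (fun k => (k, g k)))).contains k0 = ks.contains k0 := by
  simp only [PySem.Dict.contains, List.any_map]
  induction ks with
  | nil => rfl
  | cons a t ih =>
      simp only [List.any_cons, ih, Function.comp]
      by_cases h : a = k0
      · simp [h]
      · have h2 : ¬ k0 = a := fun e => h e.symm
        simp [h, h2]

theorem pvGetD_mk_map (ks : List String) (g : String → Int) (k0 : String)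
    (hnd : ks.Nodup) (hmem : k0 ∈ ks) :
    (PySem.Dict.mk (ks.map (fun k => (k, g k)))).getD k0 0 = g k0 := by
  induction ks with
  | nil => cases hmem
  | cons a t ih =>
      simp only [List.map_cons]
      rw [PySem.Dict.getD_eq_get?_getD, PySem.Dict.get?_mk_cons]
      by_cases h : a = k0
      · subst h; simp
      · have : k0 ∈ t := by
          rcases List.mem_cons.mp hmem with h' | h'
          · exact absurd h'.symm h
          · exact h'
        rw [if_neg (by simpa using h)]
        rw [← PySem.Dict.getD_eq_get?_getD]
        exact ih (List.Nodup.of_cons hnd) this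

theorem pvModifyMk (bit : Int) (ks : List String) (g : String → Int) (k0 : String)
    (hnd : ks.Nodup) (hk0 : ks.contains k0 = false → g k0 = 0) :
    (PySem.Dict.mk (ks.map (fun k => (k, g k)))).modify k0 0 (fun v => PySem.Int.bor v bit)
      = PySem.Dict.mk ((pvAddKey ks k0).map
          (fun k => (k, if k = k0 then PySem.Int.bor (g k) bit else g k))) := by
  rw [PySem.Dict.modify]
  by_cases hc : ks.contains k0 = true
  · have hmem : k0 ∈ ks := by simpa using hc
    rw [pvGetD_mk_map ks g k0 hnd hmem]
    apply PySem.Dict.ext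
    rw [PySem.Dict.items_insert_of_contains _ _ (by rw [pvContains_mk_map]; exact hc)]
    simp only [pvAddKey, if_pos hc, List.map_map]
    apply List.map_congr_left
    intro k _
    by_cases h : k = k0
    · subst h; simp
    · simp [h]
  · have hc' : ks.contains k0 = false := by simpa using hc
    rw [PySem.Dict.getD_of_not_contains _ _ (by rw [pvContains_mk_map]; exact hc')]
    apply PySem.Dict.ext
    rw [PySem.Dict.items_insert_of_not_contains _ _ (by rw [pvContains_mk_map]; exact hc')]
    simp only [pvAddKey, hc', Bool.false_eq_true, if_false,
      List.map_append, List.map_cons, List.map_nil]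
    congr 1
    · apply List.map_congr_left
      intro k hk
      have : k ≠ k0 := by
        rintro rfl
        exact absurd ((List.contains_iff_mem).mpr hk) (ne_true_of_eq_false hc')
      simp [this]
    · simp [hk0 hc']

theorem pvAddKey_nodup (ks : List String) (k : String) (hnd : ks.Nodup) :
    (pvAddKey ks k).Nodup := by
  unfold pvAddKey
  by_cases h : ks.contains k = true
  · rw [if_pos h]; exact hnd
  · rw [if_neg h]
    refine List.Nodup.append hnd (List.nodup_singleton k) ?_
    intro x hx hx'
    simp at hx'
    subst hx'
    rw [List.contains_iff_mem] at h
    exact h (by simpa using hx)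

theorem pvAddKey_contains (ks : List String) (k k0 : String) (h : ks.contains k = true) :
    (pvAddKey ks k0).contains k = true := by
  unfold pvAddKey
  by_cases hc : ks.contains k0 = true
  · rw [if_pos hc]; exact h
  · rw [if_neg hc]; simp_all

theorem pvAddKey_contains_self (ks : List String) (k : String) :
    (pvAddKey ks k).contains k = true := by
  unfold pvAddKey
  by_cases hc : ks.contains k = true
  · rw [if_pos hc]; exact hc
  · rw [if_neg hc]; simp

theorem pvFoldAdd_contains (o : List String) : ∀ ks k, ks.contains k = true →
    (o.foldl pvAddKey ks).contains k = true := by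
  induction o with
  | nil => intro ks k h; exact h
  | cons a t ih => intro ks k h; exact ih _ _ (pvAddKey_contains ks k a h)

theorem pvFoldAdd_contains_of_mem (o : List String) : ∀ ks k, o.contains k = true →
    (o.foldl pvAddKey ks).contains k = true := by
  induction o with
  | nil => intro ks k h; simp at h
  | cons a t ih =>
      intro ks k h
      by_cases hk : k = a
      · subst hk; exact pvFoldAdd_contains t _ k (pvAddKey_contains_self ks k)
      · exact ih _ _ (by simp_all)

theorem pvFoldAdd_nodup (o : List String) : ∀ ks, ks.Nodup → (o.foldl pvAddKey ks).Nodup := by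
  induction o with
  | nil => intro ks h; exact h
  | cons a t ih => intro ks h; exact ih _ (pvAddKey_nodup ks a h)

theorem pvKeys_append (occs : List (List String)) (o : List String) :
    pvKeys (occs ++ [o]) = o.foldl pvAddKey (pvKeys occs) := by
  unfold pvKeys; rw [List.foldl_append]; rfl

theorem pvKeys_nodup (occs : List (List String)) : (pvKeys occs).Nodup := by
  induction occs using List.reverseRecOn with
  | nil => simp [pvKeys]
  | append_singleton occs o ih => rw [pvKeys_append]; exact pvFoldAdd_nodup o _ ih

theorem pvMask_zero (occs : List (List String)) (k : String)
    (h : (pvKeys occs).contains k = false) :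
    pvMaskWhere occs (fun oc => oc.contains k) = 0 := by
  induction occs using List.reverseRecOn with
  | nil => rfl
  | append_singleton occs o ih =>
      rw [pvKeys_append] at h
      have h1 : (pvKeys occs).contains k = false := by
        by_contra hc
        rw [pvFoldAdd_contains o _ k (by simpa using hc)] at h
        exact absurd h (by simp)
      have h2 : o.contains k = false := by
        by_contra hc
        rw [pvFoldAdd_contains_of_mem o _ k (by simpa using hc)] at h
        exact absurd h (by simp)
      rw [pvMaskWhere_append, if_neg (ne_true_of_eq_false h2), ih h1]

theorem pvInner (bit : Int) (hbit : 0 ≤ bit) (o : List String) :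
    ∀ (ks : List String) (g : String → Int), ks.Nodup →
      (∀ k, ks.contains k = false → g k = 0) → (∀ k, 0 ≤ g k) →
      o.foldl (fun d k => d.modify k 0 (fun v => PySem.Int.bor v bit))
          (PySem.Dict.mk (ks.map (fun k => (k, g k))))
        = PySem.Dict.mk ((o.foldl pvAddKey ks).map
            (fun k => (k, if o.contains k then PySem.Int.bor (g k) bit else g k))) := by
  induction o with
  | nil => intro ks g _ _ _; simp
  | cons k0 o' ih =>
      intro ks g hnd h0 hnn
      simp only [List.foldl_cons]
      rw [pvModifyMk bit ks g k0 hnd (h0 k0)]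
      rw [ih (pvAddKey ks k0) _ (pvAddKey_nodup ks k0 hnd) ?_ ?_]
      · congr 1
        apply List.map_congr_left
        intro k _
        by_cases hk : k = k0
        · subst hk
          by_cases ho : o'.contains k = true
          · simp [pvBorIdem (g k) bit (hnn k) hbit]
          · have hno : k ∉ o' := by simpa using ho
            simp [hno]
        · simp [hk]
      · intro k hk
        have hkk0 : k ≠ k0 := by
          rintro rfl
          rw [pvAddKey_contains_self ks k] at hk
          exact absurd hk (by simp)
        have hks : ks.contains k = false := by
          by_contra hc
          rw [pvAddKey_contains ks k k0 (by simpa using hc)] at hk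
          exact absurd hk (by simp)
        simp [hkk0, h0 k hks]
      · intro k
        by_cases hk : k = k0
        · subst hk; rw [if_pos rfl]; exact pvBorNonneg _ _ (hnn k) hbit
        · simp only [if_neg hk]; exact hnn k

theorem pvMain (animals : List (List (String × List String))) :
    (PySem.List.enumerate animals 0).foldl
      (fun (st : PySem.Dict String Int × Int) p =>
        let bit : Int := 2 ^ p.1.toNat
        let occupied := (PySem.Dict.mk p.2).getD "occupied_region_keys" []
        if occupied ≠ [] then
          (occupied.foldl (fun d k => d.modify k 0 (fun v => PySem.Int.bor v bit)) st.1, st.2)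
        else
          (st.1, PySem.Int.bor st.2 bit))
      (PySem.Dict.empty, 0)
    = (PySem.Dict.mk ((pvKeys (animals.map (fun item => (PySem.Dict.mk item).getD "occupied_region_keys" []))).map
          (fun k => (k, pvMaskWhere (animals.map (fun item => (PySem.Dict.mk item).getD "occupied_region_keys" [])) (fun oc => oc.contains k)))),
       pvMaskWhere (animals.map (fun item => (PySem.Dict.mk item).getD "occupied_region_keys" [])) (fun oc => oc == [])) := by
  induction animals using List.reverseRecOn with
  | nil => rfl
  | append_singleton animals item ih =>
      rw [pvEnumAppend, List.foldl_append, ih]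
      simp only [List.foldl_cons, List.foldl_nil, zero_add, Int.toNat_natCast, List.map_append,
        List.map_cons, List.map_nil]
      set occs := animals.map (fun item => (PySem.Dict.mk item).getD "occupied_region_keys" ([] : List String)) with hoccs
      set o := (PySem.Dict.mk item).getD "occupied_region_keys" ([] : List String) with ho2
      by_cases ho : o = []
      · rw [if_neg (by simp [ho])]
        refine Prod.ext ?_ ?_
        · simp only
          rw [pvKeys_append]
          congr 1
          simp only [ho, List.foldl_nil]
          apply List.map_congr_left
          intro k _
          rw [pvMaskWhere_append]
          simp
        · simp only
          rw [pvMaskWhere_append]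
          have hlen : occs.length = animals.length := by rw [hoccs, List.length_map]
          simp [ho, hlen]
      · rw [if_pos (by simpa using ho)]
        refine Prod.ext ?_ ?_
        · simp only
          rw [pvInner ((2 : Int) ^ animals.length) (by positivity) o (pvKeys occs) _
            (pvKeys_nodup occs) (fun k hk => pvMask_zero occs k hk)
            (fun k => pvMaskWhere_nonneg occs _)]
          rw [pvKeys_append]
          congr 1
          apply List.map_congr_left
          intro k _
          rw [pvMaskWhere_append]
          simp [hoccs]
        · simp only
          rw [pvMaskWhere_append]
          rw [if_neg (by simp [ho])]

-- ===== VERDICT (by name: the statement is the Claim_ definition above) =====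
theorem build_region_masks_spec : Claim_equal_build_region_masks := by
  intro animals _
  show _ = build_region_masks_alt animals
  unfold build_region_masks build_region_masks_alt
  rw [pvMain]
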